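-- pv_equiv track=rewrite | github.com/pabloaks/c602 | unit1/dec_tree.py | powerSet3
-- ===== SOURCE A (Python) =====
-- def powerSet3(items):
--     N = len(items)
--     # enumerate the 2**N possible combinations
--     for i in range(3**N):
--         combo1 = []
--         combo2 = []
--         for j in range(N):
--             if (i//(3**j)) % 3 == 1:
--                 combo1.append(items[j])
--             elif (i//(3**j)) % 3 == 2:
--                 combo2.append(items[j])
--         yield (combo1, combo2)
-- ===== SOURCE B (Python) =====
-- def powerSet3(items):
--     # Recursive decomposition: all (combo1, combo2) pairs for items[i:],
--     # with item i the fastest-changing choice (neither / combo1 / combo2),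
--     # matching A's base-3 counting order.
--     def gen(i):
--         if i == len(items):
--             yield ([], [])
--         else:
--             x = items[i]
--             for c1, c2 in gen(i + 1):
--                 yield (list(c1), list(c2))
--                 yield ([x] + c1, c2)
--                 yield (c1, [x] + c2)
--     yield from gen(0)
-- ===== Notes on version B (the rewrite author's own statement) =====
-- stated objective: alternative
-- what changed: Replaced A's base-3 counter over range(3**N) with digit-extraction by repeated division per index with a recursive generator over the suffix items[i:] that yields the three choices (neither/combo1/combo2) for each item, producing the same enumeration order without any arithmetic.
import Mathlib
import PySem

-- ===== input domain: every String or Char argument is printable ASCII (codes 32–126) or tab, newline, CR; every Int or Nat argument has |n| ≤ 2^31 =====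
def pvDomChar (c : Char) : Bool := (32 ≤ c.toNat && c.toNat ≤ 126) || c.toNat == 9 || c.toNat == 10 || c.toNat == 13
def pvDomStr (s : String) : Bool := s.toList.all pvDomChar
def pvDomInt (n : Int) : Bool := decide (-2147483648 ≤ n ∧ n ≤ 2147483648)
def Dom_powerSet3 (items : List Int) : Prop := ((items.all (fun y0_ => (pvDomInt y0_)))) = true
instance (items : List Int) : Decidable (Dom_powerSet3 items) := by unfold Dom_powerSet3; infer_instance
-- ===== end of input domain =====

-- B replaces A's base-3 counter with a recursive generator over the suffix; same output, same order (alternative decomposition).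

-- ===== PORT A =====
-- inner loop of A: for j in range(N): test digit j of i in base 3, append items[j]
def powerSet3Inner (items : List Int) (i : Int) : List Int × List Int :=
  (PySem.List.pyRange 0 items.length 1).foldl
    (fun st j =>
      if PySem.Int.mod (PySem.Int.floordiv i ((3 : Int) ^ j.toNat)) 3 = 1 then
        (st.1 ++ [PySem.List.pyGetD items j 0], st.2)
      else if PySem.Int.mod (PySem.Int.floordiv i ((3 : Int) ^ j.toNat)) 3 = 2 then
        (st.1, st.2 ++ [PySem.List.pyGetD items j 0])
      else st)
    ([], [])

def powerSet3 (items : List Int) : List (List Int × List Int) :=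
  (PySem.List.pyRange 0 ((3 : Int) ^ items.length) 1).map (powerSet3Inner items)

-- ===== PORT B =====
-- B's recursive generator gen(i) over items[i:], transcribed as structural recursion on the suffix
def powerSet3AltGen : List Int → List (List Int × List Int)
  | [] => [([], [])]
  | x :: xs =>
    (powerSet3AltGen xs).flatMap (fun p => [(p.1, p.2), (x :: p.1, p.2), (p.1, x :: p.2)])

def powerSet3_alt (items : List Int) : List (List Int × List Int) :=
  powerSet3AltGen items

-- ===== PRECONDITION & SPEC =====
def Spec_powerSet3 (items : List Int) (out : List (List Int × List Int)) : Prop := out = powerSet3_alt items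
instance (items : List Int) (out : List (List Int × List Int)) : Decidable (Spec_powerSet3 items out) := by unfold Spec_powerSet3; infer_instance

-- ===== CLAIM (what is proved, stated in full; the proofs are below) =====
def Claim_equal_powerSet3 : Prop := ∀ (items : List Int), Dom_powerSet3 items → Spec_powerSet3 items (powerSet3 items)

-- ===== LEMMAS AND PROOFS =====

-- ===== VERDICT (by name: the statement is the Claim_ definition above) =====
-- decode: the value A's inner loop computes for counter i, by recursion on the list
def pvDecode : List Int → Int → List Int × List Int
  | [], _ => ([], [])
  | x :: xs, i =>
    let p := pvDecode xs (PySem.Int.floordiv i 3)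
    if PySem.Int.mod i 3 = 1 then (x :: p.1, p.2)
    else if PySem.Int.mod i 3 = 2 then (p.1, x :: p.2)
    else p

theorem pv_fd3 (q r : Int) (h0 : 0 ≤ r) (h3 : r < 3) :
    PySem.Int.floordiv (3 * q + r) 3 = q := by
  rw [PySem.Int.floordiv_eq_iff_of_pos (by norm_num)]
  omega

theorem pv_md3 (q r : Int) (h0 : 0 ≤ r) (h3 : r < 3) :
    PySem.Int.mod (3 * q + r) 3 = r := by
  have h := PySem.Int.floordiv_mul_add_mod (3 * q + r) 3
  rw [pv_fd3 q r h0 h3] at h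
  omega

theorem pv_decode_cons (x : Int) (xs : List Int) (q r : Int) (h0 : 0 ≤ r) (h3 : r < 3) :
    pvDecode (x :: xs) (3 * q + r) =
      (let p := pvDecode xs q;
       if r = 1 then (x :: p.1, p.2) else if r = 2 then (p.1, x :: p.2) else p) := by
  simp only [pvDecode, pv_fd3 q r h0 h3, pv_md3 q r h0 h3]

theorem pv_div_shift (i : Int) (k : Nat) :
    PySem.Int.floordiv i ((3 : Int) ^ (k + 1)) =
      PySem.Int.floordiv (PySem.Int.floordiv i 3) ((3 : Int) ^ k) := by
  rw [PySem.Int.floordiv_eq_ediv_of_pos (by positivity),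
      PySem.Int.floordiv_eq_ediv_of_pos (by norm_num : (0:Int) < 3),
      PySem.Int.floordiv_eq_ediv_of_pos (by positivity),
      Int.ediv_ediv_eq_ediv_mul (by norm_num : (0:Int) ≤ 3), ← pow_succ']

theorem pv_inner_fold (items : List Int) (i : Int) (acc : List Int × List Int) :
    (PySem.List.pyRange 0 items.length 1).foldl
      (fun st j =>
        if PySem.Int.mod (PySem.Int.floordiv i ((3 : Int) ^ j.toNat)) 3 = 1 then
          (st.1 ++ [PySem.List.pyGetD items j 0], st.2)
        else if PySem.Int.mod (PySem.Int.floordiv i ((3 : Int) ^ j.toNat)) 3 = 2 then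
          (st.1, st.2 ++ [PySem.List.pyGetD items j 0])
        else st)
      acc
    = (acc.1 ++ (pvDecode items i).1, acc.2 ++ (pvDecode items i).2) := by
  induction items generalizing i acc with
  | nil =>
      rw [show ((List.length ([] : List Int) : Int)) = ((0 : Nat) : Int) by simp,
          PySem.List.pyRange_zero_nat]
      simp [pvDecode]
  | cons x xs ih =>
      rw [show (((x :: xs).length : Int)) = ((xs.length + 1 : Nat) : Int) by simp,
          PySem.List.pyRange_zero_nat, List.range_succ_eq_map]
      simp only [List.map_cons, List.foldl_cons, List.map_map, List.foldl_map,
        Function.comp_def]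
      have hfd1 : PySem.Int.floordiv i ((3 : Int) ^ ((0 : Nat) : Int).toNat) = i := by
        rw [PySem.Int.floordiv_eq_ediv_of_pos (by simp)]
        simp
      have hfun :
          (fun (st : List Int × List Int) (k : Nat) =>
            if PySem.Int.mod
                (PySem.Int.floordiv i ((3 : Int) ^ ((Nat.succ k : Nat) : Int).toNat)) 3 = 1 then
              (st.1 ++ [PySem.List.pyGetD (x :: xs) ((Nat.succ k : Nat) : Int) 0], st.2)
            else if PySem.Int.mod
                (PySem.Int.floordiv i ((3 : Int) ^ ((Nat.succ k : Nat) : Int).toNat)) 3 = 2 then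
              (st.1, st.2 ++ [PySem.List.pyGetD (x :: xs) ((Nat.succ k : Nat) : Int) 0])
            else st)
          = (fun (st : List Int × List Int) (k : Nat) =>
            if PySem.Int.mod
                (PySem.Int.floordiv (PySem.Int.floordiv i 3) ((3 : Int) ^ ((k : Nat) : Int).toNat)) 3 = 1 then
              (st.1 ++ [PySem.List.pyGetD xs ((k : Nat) : Int) 0], st.2)
            else if PySem.Int.mod
                (PySem.Int.floordiv (PySem.Int.floordiv i 3) ((3 : Int) ^ ((k : Nat) : Int).toNat)) 3 = 2 then
              (st.1, st.2 ++ [PySem.List.pyGetD xs ((k : Nat) : Int) 0])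
            else st) := by
        funext st k
        have h1 : (((Nat.succ k : Nat) : Int)).toNat = k + 1 := by simp
        have h2 : (((k : Nat) : Int)).toNat = k := by simp
        rw [h1, h2, pv_div_shift i k]
        simp only [PySem.List.pyGetD_natCast]
        simp [Nat.succ_eq_add_one]
      rw [hfun]
      have hih := ih (PySem.Int.floordiv i 3)
        (if PySem.Int.mod (PySem.Int.floordiv i ((3 : Int) ^ ((0 : Nat) : Int).toNat)) 3 = 1 then
          (acc.1 ++ [PySem.List.pyGetD (x :: xs) ((0 : Nat) : Int) 0], acc.2)
        else if PySem.Int.mod (PySem.Int.floordiv i ((3 : Int) ^ ((0 : Nat) : Int).toNat)) 3 = 2 then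
          (acc.1, acc.2 ++ [PySem.List.pyGetD (x :: xs) ((0 : Nat) : Int) 0])
        else acc)
      rw [show ((xs.length : Int)) = ((xs.length : Nat) : Int) from rfl,
          PySem.List.pyRange_zero_nat, List.foldl_map] at hih
      rw [hih, hfd1]
      have hget0 : PySem.List.pyGetD (x :: xs) ((0 : Nat) : Int) 0 = x := by simp
      rw [hget0]
      show _ = (acc.1 ++ (pvDecode (x :: xs) i).1, acc.2 ++ (pvDecode (x :: xs) i).2)
      simp only [pvDecode]
      by_cases h1 : i % 3 = 1
      · simp [h1]
      · by_cases h2 : i % 3 = 2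
        · simp [h1, h2]
        · simp [h1, h2]

theorem inner_eq_decode (items : List Int) (i : Int) :
    powerSet3Inner items i = pvDecode items i := by
  unfold powerSet3Inner
  rw [pv_inner_fold items i ([], [])]
  simp

theorem pv_range_three (m : Nat) :
    List.range (3 * m) = (List.range m).flatMap (fun q => [3 * q, 3 * q + 1, 3 * q + 2]) := by
  induction m with
  | zero => simp
  | succ m ih =>
      have h : 3 * (m + 1) = (3 * m + 1 + 1) + 1 := by ring
      rw [h, List.range_succ, List.range_succ, List.range_succ, List.range_succ,
          List.flatMap_append, ← ih]
      simp

theorem outer_eq (items : List Int) :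
    (List.range (3 ^ items.length)).map (fun (k : Nat) => pvDecode items ((k : Nat) : Int))
      = powerSet3AltGen items := by
  induction items with
  | nil => simp [pvDecode, powerSet3AltGen]
  | cons x xs ih =>
      have h : (3 : Nat) ^ (x :: xs).length = 3 * 3 ^ xs.length := by
        simp [pow_succ]; ring
      rw [powerSet3AltGen, ← ih, h, pv_range_three, List.map_flatMap, List.flatMap_map]
      apply List.flatMap_congr
      intro q _
      have e0 : ((3 * q : Nat) : Int) = 3 * (q : Int) + 0 := by push_cast; ring
      have e1 : ((3 * q + 1 : Nat) : Int) = 3 * (q : Int) + 1 := by push_cast; ring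
      have e2 : ((3 * q + 2 : Nat) : Int) = 3 * (q : Int) + 2 := by push_cast; ring
      simp only [List.map_cons, List.map_nil, Function.comp, e0, e1, e2,
        pv_decode_cons x xs (q : Int) 0 (by norm_num) (by norm_num),
        pv_decode_cons x xs (q : Int) 1 (by norm_num) (by norm_num),
        pv_decode_cons x xs (q : Int) 2 (by norm_num) (by norm_num)]
      simp

-- ===== VERDICT (by name: the statement is the Claim_ definition above) =====
theorem powerSet3_spec : Claim_equal_powerSet3 := by
  intro items _
  unfold Spec_powerSet3 powerSet3 powerSet3_alt
  have h : ((3 : Int) ^ items.length) = ((3 ^ items.length : Nat) : Int) := by push_cast; ring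
  rw [h, PySem.List.pyRange_zero_nat, List.map_map, ← outer_eq]
  apply List.map_congr_left
  intro k _
  exact inner_eq_decode items (k : Int)
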